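-- pv_equiv track=rewrite | github.com/SrinidhiBalasubramanian/Mahanvesa | RAG/rag_core.py | make_context
-- ===== SOURCE A (Python) =====
-- from typing import List, Dict, Tuple
--
-- def make_context(top_ids: List[str], verses: Dict[str, str]) -> str:
--     """Builds the context string from the VERSES file."""
--     context = ""
--     for i in top_ids:
--         verses_context = {}
--         v_id_prefix = f"{i.strip('M.')}."
--
--         # Find all verses starting with this chapter ID
--         for vid in verses.keys():
--             if vid.startswith(v_id_prefix):
--                 verses_context[vid] = verses[vid]
--
--         if verses_context:
--              context += f"--- Context from Chapter {i} ---\n"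
--              context += str(verses_context) + "\n ========== \n"
--
--     if not context:
--         return "No context found for the retrieved chapter IDs."
--     return context
-- ===== SOURCE B (Python) =====
-- from typing import List, Dict
--
-- def make_context(top_ids: List[str], verses: Dict[str, str]) -> str:
--     """Builds the context string from the VERSES file.
--
--     One pass over the verses builds an index from each dot-terminated prefix
--     of a verse id to the (id, text) pairs under it; each top_id is then a
--     single lookup instead of a scan of all verses.
--     """
--     index = {}
--     for vid, text in verses.items():
--         for j, ch in enumerate(vid):
--             if ch == '.':
--                 index.setdefault(vid[:j], []).append((vid, text))
--     parts = []
--     for i in top_ids: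
--         matches = index.get(i.strip('M.'), [])
--         if matches:
--             parts.append(f"--- Context from Chapter {i} ---\n"
--                          + str(dict(matches)) + "\n ========== \n")
--     context = "".join(parts)
--     if not context:
--         return "No context found for the retrieved chapter IDs."
--     return context
-- ===== Notes on version B (the rewrite author's own statement) =====
-- stated objective: faster
-- what changed: Instead of rescanning all verse ids for each top_id, B builds once an index from every dot-terminated prefix of a verse id to its (id, text) pairs, so each top_id is a single dictionary lookup; output pieces are joined at the end.
import Mathlib
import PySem

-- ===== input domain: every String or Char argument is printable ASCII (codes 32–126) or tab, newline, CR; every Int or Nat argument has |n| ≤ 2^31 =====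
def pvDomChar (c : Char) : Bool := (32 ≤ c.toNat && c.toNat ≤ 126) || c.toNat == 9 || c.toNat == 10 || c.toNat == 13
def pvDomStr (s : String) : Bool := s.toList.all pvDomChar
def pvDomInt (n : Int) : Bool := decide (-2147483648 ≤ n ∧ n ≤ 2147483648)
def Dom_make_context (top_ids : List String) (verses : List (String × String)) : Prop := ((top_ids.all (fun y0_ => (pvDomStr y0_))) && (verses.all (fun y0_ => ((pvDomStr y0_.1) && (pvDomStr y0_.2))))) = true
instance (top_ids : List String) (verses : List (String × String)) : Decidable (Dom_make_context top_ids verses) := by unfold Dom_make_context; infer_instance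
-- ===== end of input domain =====

-- B replaces A's rescan of all verse ids per top_id by a one-pass index from every
-- dot-terminated prefix of a verse id to its (id, text) pairs; per top_id one lookup.

-- shared helper: Python repr(s) for a str — exact on the Dom alphabet
-- (printable ASCII plus tab/newline/CR): quote choice and the escapes \\ \' \t \n \r.
def pyReprChars (s : List Char) : List Char :=
  let q : Char := if '\'' ∈ s ∧ '"' ∉ s then '"' else '\''
  q :: s.flatMap (fun c =>
    if c = '\\' then ['\\', '\\']
    else if c = q then ['\\', q]
    else if c = '\t' then ['\\', 't']
    else if c = '\n' then ['\\', 'n']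
    else if c = '\r' then ['\\', 'r']
    else [c]) ++ [q]

-- shared helper: Python str(d) for a dict of strings, given its items in order
def pyStrAssoc (items : List (String × String)) : List Char :=
  '{' :: PySem.Chars.join [',', ' ']
      (items.map (fun kv => pyReprChars kv.1.toList ++ ':' :: ' ' :: pyReprChars kv.2.toList))
    ++ ['}']

-- ===== PORT A =====
def make_context (top_ids : List String) (verses : List (String × String)) : String :=
  let d := PySem.Dict.ofList verses
  let context := top_ids.foldl (fun context i =>
    let pfx := PySem.Chars.stripChars i.toList ['M', '.'] ++ ['.']
    -- for vid in verses.keys(): if vid.startswith(v_id_prefix): verses_context[vid] = verses[vid]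
    let vc := d.keys.foldl (fun vc vid =>
        if PySem.Chars.startswith vid.toList pfx then vc.insert vid (d.getD vid "") else vc)
      (PySem.Dict.empty : PySem.Dict String String)
    if vc.items = [] then context
    else context ++ "--- Context from Chapter ".toList ++ i.toList ++ " ---\n".toList
      ++ pyStrAssoc vc.items ++ "\n ========== \n".toList) []
  if context = [] then "No context found for the retrieved chapter IDs."
  else String.ofList context

-- ===== PORT B =====
-- index.setdefault(vid[:j], []).append((vid, text)) for each j with vid[j] == '.'
def dotIndex (items : List (String × String)) : PySem.Dict (List Char) (List (String × String)) :=
  items.foldl (fun idx kv =>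
    (PySem.List.enumerate kv.1.toList).foldl (fun idx p =>
      if p.2 = '.' then idx.modify (kv.1.toList.take p.1.toNat) [] (fun l => l ++ [kv]) else idx) idx)
    PySem.Dict.empty

def make_context_alt (top_ids : List String) (verses : List (String × String)) : String :=
  let idx := dotIndex (PySem.Dict.ofList verses).items
  let parts := top_ids.foldl (fun parts i =>
    let ms := idx.getD (PySem.Chars.stripChars i.toList ['M', '.']) []
    if ms = [] then parts
    else parts ++ ["--- Context from Chapter ".toList ++ i.toList ++ " ---\n".toList
      ++ pyStrAssoc (PySem.Dict.ofList ms).items ++ "\n ========== \n".toList]) []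
  let context := parts.flatten   -- "".join(parts)
  if context = [] then "No context found for the retrieved chapter IDs."
  else String.ofList context

-- ===== PRECONDITION & SPEC =====
def Spec_make_context (top_ids : List String) (verses : List (String × String)) (out : String) : Prop := out = make_context_alt top_ids verses
instance (top_ids : List String) (verses : List (String × String)) (out : String) : Decidable (Spec_make_context top_ids verses out) := by unfold Spec_make_context; infer_instance

-- ===== CLAIM (what is proved, stated in full; the proofs are below) =====
def Claim_equal_make_context : Prop := ∀ (top_ids : List String) (verses : List (String × String)), Dom_make_context top_ids verses → Spec_make_context top_ids verses (make_context top_ids verses)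

-- ===== LEMMAS AND PROOFS =====

-- (p ++ ['.']) is a prefix of l  ↔  l.take p.length = p and l[p.length]? = '.'
lemma prefix_dot_iff (p l : List Char) :
    (p ++ ['.']) <+: l ↔ p.length < l.length ∧ l.take p.length = p ∧ l[p.length]? = some '.' := by
  constructor
  · rintro ⟨t, ht⟩
    subst ht
    rw [List.append_assoc]
    refine ⟨by simp, by simp, ?_⟩
    rw [List.getElem?_append_right (by simp)]
    simp
  · rintro ⟨hlen, htake, hget⟩
    have hget' : l[p.length] = '.' := by
      have := List.getElem?_eq_getElem hlen
      rw [this] at hget; exact Option.some.inj hget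
    refine ⟨l.drop (p.length + 1), ?_⟩
    conv_rhs => rw [← List.take_append_drop p.length l, List.drop_eq_getElem_cons hlen]
    simp [htake, hget']

-- one verse pair: folding over the enumerated id from position n onward appends kv to
-- bucket p exactly when some j ≥ n has vid[j] = '.' and vid[:j] = p, i.e. p ++ "." <+: vid with p.length ≥ n
lemma inner_fold_aux (kv : String × String) (k : Nat) :
    ∀ (n : Nat) (idx : PySem.Dict (List Char) (List (String × String))) (p : List Char),
    kv.1.toList.length - n = k →
    ((PySem.List.enumerate (kv.1.toList.drop n) n).foldl (fun idx q =>
        if q.2 = '.' then idx.modify (kv.1.toList.take q.1.toNat) [] (fun l => l ++ [kv]) else idx) idx).getD p []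
    = idx.getD p [] ++
      (if (p ++ ['.']) <+: kv.1.toList ∧ n ≤ p.length then [kv] else []) := by
  induction k with
  | zero =>
    intro n idx p hk
    have hge : kv.1.toList.length ≤ n := by omega
    rw [List.drop_eq_nil_of_le hge, PySem.List.enumerate_nil, List.foldl_nil]
    rw [if_neg]
    · simp
    · rintro ⟨hpre, hle⟩
      have := (prefix_dot_iff p kv.1.toList).mp hpre
      omega
  | succ k ih =>
    intro n idx p hk
    have hlt : n < kv.1.toList.length := by omega
    rw [List.drop_eq_getElem_cons hlt, PySem.List.enumerate_cons, List.foldl_cons]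
    have hcast : ((n : Int) + 1) = ((n + 1 : Nat) : Int) := by push_cast; ring
    rw [hcast]
    dsimp only
    rw [Int.toNat_natCast]
    by_cases hdot : kv.1.toList[n] = '.'
    · by_cases heq : kv.1.toList.take n = p
      · -- the match happens here
        have hplen : p.length = n := by
          rw [← heq, List.length_take]; omega
        rw [if_pos (by simp [hdot])]
        rw [ih (n+1) _ p (by omega)]
        rw [if_neg (by rintro ⟨_, h2⟩; omega)]
        rw [PySem.Dict.getD_modify, if_pos heq.symm, heq]
        rw [if_pos ?_]
        · simp
        · constructor
          · rw [prefix_dot_iff]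
            refine ⟨by omega, by rw [hplen]; exact heq, ?_⟩
            rw [hplen, List.getElem?_eq_getElem hlt, hdot]

          · omega
      · -- dot but different prefix
        rw [if_pos (by simp [hdot])]
        rw [ih (n+1) _ p (by omega)]
        rw [PySem.Dict.getD_modify]
        rw [if_neg (fun h => heq h.symm)]
        congr 1
        by_cases hpre : (p ++ ['.']) <+: kv.1.toList
        · have hfacts := (prefix_dot_iff p kv.1.toList).mp hpre
          by_cases hn : p.length = n
          · exfalso
            apply heq
            rw [← hn]; exact hfacts.2.1
          · by_cases hle : n ≤ p.length
            · rw [if_pos ⟨hpre, by omega⟩, if_pos ⟨hpre, hle⟩]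
            · rw [if_neg (by rintro ⟨_, h⟩; omega), if_neg (by rintro ⟨_, h⟩; omega)]
        · rw [if_neg (by rintro ⟨h, _⟩; exact hpre h), if_neg (by rintro ⟨h, _⟩; exact hpre h)]
    · -- no dot at n
      rw [if_neg (by simpa using hdot)]
      rw [ih (n+1) _ p (by omega)]
      congr 1
      by_cases hpre : (p ++ ['.']) <+: kv.1.toList
      · have hfacts := (prefix_dot_iff p kv.1.toList).mp hpre
        by_cases hn : p.length = n
        · exfalso
          apply hdot
          have := hfacts.2.2
          rw [hn, List.getElem?_eq_getElem hlt] at this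
          exact Option.some.inj this
        · by_cases hle : n ≤ p.length
          · rw [if_pos ⟨hpre, by omega⟩, if_pos ⟨hpre, hle⟩]
          · rw [if_neg (by rintro ⟨_, h⟩; omega), if_neg (by rintro ⟨_, h⟩; omega)]
      · rw [if_neg (by rintro ⟨h, _⟩; exact hpre h), if_neg (by rintro ⟨h, _⟩; exact hpre h)]

-- the index bucket at p is exactly the filter of the verse items by prefix p ++ "."
lemma dotIndex_getD (items : List (String × String)) (p : List Char) :
    (dotIndex items).getD p []
      = items.filter (fun kv => PySem.Chars.startswith kv.1.toList (p ++ ['.'])) := by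
  suffices h : ∀ idx : PySem.Dict (List Char) (List (String × String)),
      (items.foldl (fun idx kv =>
        (PySem.List.enumerate kv.1.toList).foldl (fun idx q =>
          if q.2 = '.' then idx.modify (kv.1.toList.take q.1.toNat) [] (fun l => l ++ [kv]) else idx) idx)
        idx).getD p []
      = idx.getD p [] ++ items.filter (fun kv => PySem.Chars.startswith kv.1.toList (p ++ ['.'])) by
    have := h PySem.Dict.empty
    simpa [dotIndex] using this
  induction items with
  | nil => intro idx; simp
  | cons kv rest ih =>
    intro idx
    rw [List.foldl_cons]
    have hstart := inner_fold_aux kv kv.1.toList.length 0 idx p (by simp)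
    rw [List.drop_zero] at hstart
    simp only [Nat.cast_zero] at hstart
    rw [ih, hstart]
    by_cases hpre : (p ++ ['.']) <+: kv.1.toList
    · rw [if_pos ⟨hpre, by omega⟩]
      rw [List.filter_cons_of_pos (by rw [PySem.Chars.startswith_iff]; exact hpre)]
      simp
    · rw [if_neg (by rintro ⟨h, _⟩; exact hpre h)]
      rw [List.filter_cons_of_neg (by simp [PySem.Chars.startswith_iff]; exact hpre)]
      simp

-- A's inner loop builds the dict whose items are the filtered items of d
lemma vc_items (d : PySem.Dict String String) (hnd : d.keys.Nodup) (pfx : List Char) :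
    (d.keys.foldl (fun vc vid =>
        if PySem.Chars.startswith vid.toList pfx then vc.insert vid (d.getD vid "") else vc)
      (PySem.Dict.empty : PySem.Dict String String)).items
    = d.items.filter (fun kv => PySem.Chars.startswith kv.1.toList pfx) := by
  have h1 : (d.keys.foldl (fun vc vid =>
        if PySem.Chars.startswith vid.toList pfx then vc.insert vid (d.getD vid "") else vc)
      (PySem.Dict.empty : PySem.Dict String String))
      = (d.keys.filter (fun vid => PySem.Chars.startswith vid.toList pfx)).foldl
          (fun vc vid => vc.insert vid (d.getD vid "")) PySem.Dict.empty :=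
    List.foldl_filter.symm
  rw [h1]
  have fresh := PySem.Dict.items_foldl_insert_fresh
    (l := d.keys.filter (fun vid => PySem.Chars.startswith vid.toList pfx))
    (k := fun a => a) (v := fun a => d.getD a "") (d := PySem.Dict.empty)
    (by intro a _; exact PySem.Dict.contains_empty _)
    (by simpa using hnd.filter _)
  rw [fresh]
  rw [PySem.Dict.items_eq_map_keys d hnd ""]
  rw [List.filter_map]
  rfl

-- a filtered slice of a nodup-key item list rebuilds to itself as a dict
lemma ofList_items_self (ms : List (String × String)) (h : (ms.map (·.1)).Nodup) :
    (PySem.Dict.ofList ms).items = ms := by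
  have := PySem.Dict.items_foldl_insert_fresh (l := ms) (k := (·.1)) (v := (·.2))
    (d := PySem.Dict.empty) (by intro a _; exact PySem.Dict.contains_empty _) h
  simpa [PySem.Dict.ofList, PySem.Dict.update] using this

-- joining conditionally collected pieces equals conditional concatenation
lemma flatten_fold_eq {α β : Type} (l : List α) (c : α → List β) (g : α → List Char) :
    ∀ ps : List (List Char),
    (l.foldl (fun ps i => if c i = [] then ps else ps ++ [g i]) ps).flatten
    = l.foldl (fun ctx i => if c i = [] then ctx else ctx ++ g i) ps.flatten := by
  induction l with
  | nil => intro ps; simp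
  | cons i l ih =>
    intro ps
    simp only [List.foldl_cons]
    by_cases h : c i = []
    · simp [h, ih]
    · simp [h, ih (ps ++ [g i])]

-- a filtered slice of d's items still has unique keys, so rebuilding it as a dict is the identity
lemma ofList_filter_items (d : PySem.Dict String String) (hnd : d.keys.Nodup) (q : String × String → Bool) :
    (PySem.Dict.ofList (d.items.filter q)).items = d.items.filter q := by
  apply ofList_items_self
  have hsub : List.Sublist ((d.items.filter q).map (·.1)) (d.items.map (·.1)) :=
    List.filter_sublist.map _
  exact hsub.nodup hnd

-- ===== VERDICT (by name: the statement is the Claim_ definition above) =====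
theorem make_context_spec : Claim_equal_make_context := by
  intro top_ids verses _
  unfold Spec_make_context make_context make_context_alt
  have hnd : (PySem.Dict.ofList verses).keys.Nodup := PySem.Dict.nodup_keys_ofList verses
  simp only [vc_items (PySem.Dict.ofList verses) hnd, dotIndex_getD,
    ofList_filter_items (PySem.Dict.ofList verses) hnd]
  rw [flatten_fold_eq top_ids
      (fun i => (PySem.Dict.ofList verses).items.filter
        (fun kv => PySem.Chars.startswith kv.1.toList (PySem.Chars.stripChars i.toList ['M', '.'] ++ ['.'])))
      (fun i => "--- Context from Chapter ".toList ++ i.toList ++ " ---\n".toList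
        ++ pyStrAssoc ((PySem.Dict.ofList verses).items.filter
            (fun kv => PySem.Chars.startswith kv.1.toList (PySem.Chars.stripChars i.toList ['M', '.'] ++ ['.'])))
        ++ "\n ========== \n".toList) []]
  simp only [List.flatten_nil, List.append_assoc]
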